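-- pv_equiv track=rewrite | github.com/lifera/Algorithms | 5 GenomicRangeQuery.py | solution2
-- ===== SOURCE A (Python) =====
-- def solution2(S:str, P:[], Q:[]) -> [int]:
--     def prefix_sums(A):
--         n = len(A)
--         prefs = [0] * (n+1)
--         for num, a in enumerate(A):
--             prefs[num+1] = prefs[num] + a
--         return  prefs
--
--     def count_total(P, x, y):
--         return P[y+1] - P[x]
--
--     results = []
--     s = S.replace('A', '1').replace('C', '2').replace('G', '3').replace('T', '4')
--     integers = [int(x) for x in s]
--     pref = prefix_sums(integers)
--
--     for p, q in zip(P, Q):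
--         results.append(count_total(pref, p, q))
--
--     return results
-- ===== SOURCE B (Python) =====
-- def solution2(S, P, Q):
--     vals = {'A': 1, 'C': 2, 'G': 3, 'T': 4}
--     integers = [vals[c] if c in vals else int(c) for c in S]
--     out = []
--     for p, q in zip(P, Q):
--         total = 0
--         for i in range(p, q + 1):
--             total += integers[i]
--         out.append(total)
--     return out
-- ===== Notes on version B (the rewrite author's own statement) =====
-- stated objective: simpler
-- what changed: B drops A's replace-chain and prefix-sum table: it maps each character through a small dict (falling back to int(c)) and answers every query by directly summing integers[p..q] with an inner loop.
-- outside the precondition, e.g. on solution2('AC', [-1], [0]): A returns [-2], B returns [3]; on solution2('ACG', [2], [0]): A returns [-2], B returns [0]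
import Mathlib
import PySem

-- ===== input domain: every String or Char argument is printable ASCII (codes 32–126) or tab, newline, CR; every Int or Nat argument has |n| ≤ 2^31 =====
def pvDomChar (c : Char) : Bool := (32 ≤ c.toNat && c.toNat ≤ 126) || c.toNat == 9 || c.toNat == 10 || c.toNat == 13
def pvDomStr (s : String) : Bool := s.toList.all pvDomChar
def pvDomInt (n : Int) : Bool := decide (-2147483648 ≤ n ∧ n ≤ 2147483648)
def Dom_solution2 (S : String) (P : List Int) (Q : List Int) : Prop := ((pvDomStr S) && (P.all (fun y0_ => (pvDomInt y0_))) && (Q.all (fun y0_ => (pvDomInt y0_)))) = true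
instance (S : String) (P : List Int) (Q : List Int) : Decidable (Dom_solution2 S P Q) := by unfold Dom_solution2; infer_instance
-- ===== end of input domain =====

-- B replaces A's replace-chain + prefix-sum table by a per-character dict lookup and a direct
-- per-query summation loop (simpler, no table; not faster).

-- ===== PORT A =====
-- int(x) for a one-character string x; the none case (ValueError) is excluded by Pre_solution2
def pvIntOfChar (c : Char) : Int := (PySem.Int.ofChars? [c]).getD 0

-- prefix_sums: prefs = [0]*(n+1); for num, a in enumerate(A): prefs[num+1] = prefs[num] + a
def pvPrefixSums (A : List Int) : List Int :=
  (PySem.List.enumerate A 0).foldl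
    (fun prefs na =>
      PySem.List.pySetD prefs (na.1 + 1) (PySem.List.pyGetD prefs na.1 0 + na.2))
    (List.replicate (A.length + 1) (0 : Int))

-- count_total: P[y+1] - P[x]; the IndexError cases of pyGet? are excluded by Pre_solution2
def pvCountTotal (Pf : List Int) (x y : Int) : Int :=
  PySem.List.pyGetD Pf (y + 1) 0 - PySem.List.pyGetD Pf x 0

def solution2 (S : String) (P : List Int) (Q : List Int) : List Int :=
  let s := PySem.Str.replace (PySem.Str.replace (PySem.Str.replace
             (PySem.Str.replace S "A" "1") "C" "2") "G" "3") "T" "4"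
  let integers := s.toList.map pvIntOfChar
  let pref := pvPrefixSums integers
  (P.zip Q).foldl (fun results pq => results ++ [pvCountTotal pref pq.1 pq.2]) []

-- ===== PORT B =====
def pvNucVals : PySem.Dict Char Int := PySem.Dict.ofList [('A', 1), ('C', 2), ('G', 3), ('T', 4)]

-- vals[c] if c in vals else int(c)
def pvMapChar (c : Char) : Int :=
  match PySem.Dict.get? pvNucVals c with
  | some v => v
  | none => (PySem.Int.ofChars? [c]).getD 0

def solution2_alt (S : String) (P : List Int) (Q : List Int) : List Int :=
  let integers := S.toList.map pvMapChar
  (P.zip Q).foldl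
    (fun out pq =>
      out ++ [(PySem.List.pyRange pq.1 (pq.2 + 1) 1).foldl
                (fun t i => t + PySem.List.pyGetD integers i 0) 0])
    []

-- ===== PRECONDITION & SPEC =====
-- Pre_ excludes strings with a character outside {A,C,G,T,0..9} (A raises ValueError) and query
-- pairs whose indices are negative, inverted by more than one, or out of range: there A either
-- raises IndexError or returns an accidental value of Python's negative-index wraparound /
-- inverted prefix difference, a corner no caller of a genomic range query would specify.
def Pre_solution2 (S : String) (P : List Int) (Q : List Int) : Prop :=
  S.toList.all
      (fun c => (['A', 'C', 'G', 'T', '0', '1', '2', '3', '4', '5', '6', '7', '8', '9'] : List Char).contains c)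
    = true ∧
  (P.zip Q).all
      (fun pq => decide (0 ≤ pq.1) && decide (pq.1 ≤ pq.2 + 1) && decide (pq.2 < (S.toList.length : Int)))
    = true

instance (S : String) (P : List Int) (Q : List Int) : Decidable (Pre_solution2 S P Q) := by
  unfold Pre_solution2; infer_instance

def pvWitness_solution2 : String × List Int × List Int := ("ACGT5", [0, 1], [1, 4])

def Spec_solution2 (S : String) (P : List Int) (Q : List Int) (out : List Int) : Prop :=
  out = solution2_alt S P Q
instance (S : String) (P : List Int) (Q : List Int) (out : List Int) :
    Decidable (Spec_solution2 S P Q out) := by unfold Spec_solution2; infer_instance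

-- ===== CLAIM (what is proved, stated in full; the proofs are below) =====
def Claim_equal_solution2 : Prop :=
  ∀ (S : String) (P : List Int) (Q : List Int),
    Dom_solution2 S P Q → Pre_solution2 S P Q → Spec_solution2 S P Q (solution2 S P Q)

-- ===== LEMMAS AND PROOFS =====

-- single-character str.replace is a character map
theorem replace_single_go (o n : Char) :
    ∀ (l acc : List Char) (fuel : Nat), l.length ≤ fuel →
      PySem.Chars.replace.go [o] [n] fuel l acc =
        acc.reverse ++ l.map (fun x => if x = o then n else x) := by
  intro l
  induction l with
  | nil => intro acc fuel _; cases fuel <;> simp [PySem.Chars.replace.go]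
  | cons c t ih =>
    intro acc fuel hf
    cases fuel with
    | zero => simp at hf
    | succ fuel =>
      simp only [PySem.Chars.replace.go]
      by_cases hc : c = o
      · subst hc
        have hpre : List.isPrefixOf [c] (c :: t) = true := by
          simp [List.isPrefixOf]
        simp only [hpre, if_pos, List.length_cons, List.length_nil, List.drop_succ_cons,
          List.drop_zero]
        rw [ih _ fuel (by simpa using Nat.le_of_succ_le_succ hf)]
        simp
      · have hpre : List.isPrefixOf [o] (c :: t) = false := by
          simp [List.isPrefixOf, BEq.beq]
          intro h; exact absurd h.symm hc
        simp only [hpre]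
        rw [ih _ fuel (by simpa using Nat.le_of_succ_le_succ hf)]
        simp [hc]

theorem replace_single (cs : List Char) (o n : Char) :
    PySem.Chars.replace cs [o] [n] = cs.map (fun x => if x = o then n else x) := by
  simp only [PySem.Chars.replace, List.isEmpty_cons, Bool.false_eq_true, if_false]
  simpa using replace_single_go o n cs [] cs.length le_rfl

-- the per-character effect of A's conversion pipeline agrees with B's dict lookup on Pre_'s chars
set_option maxHeartbeats 1000000 in
theorem char_map_eq (c : Char)
    (hc : c ∈ (['A', 'C', 'G', 'T', '0', '1', '2', '3', '4', '5', '6', '7', '8', '9'] : List Char)) :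
    (pvIntOfChar ∘
        (fun x => if x = 'T' then '4' else x) ∘
          (fun x => if x = 'G' then '3' else x) ∘
            (fun x => if x = 'C' then '2' else x) ∘ fun x => if x = 'A' then '1' else x)
      c = pvMapChar c := by
  simp only [List.mem_cons, List.not_mem_nil, or_false] at hc
  rcases hc with rfl|rfl|rfl|rfl|rfl|rfl|rfl|rfl|rfl|rfl|rfl|rfl|rfl|rfl <;> decide

-- A's integer list equals B's integer list on Pre_'s strings
theorem integers_eq (S : String)
    (hS : ∀ c ∈ S.toList,
      c ∈ (['A', 'C', 'G', 'T', '0', '1', '2', '3', '4', '5', '6', '7', '8', '9'] : List Char)) :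
    ((PySem.Str.replace (PySem.Str.replace (PySem.Str.replace
        (PySem.Str.replace S "A" "1") "C" "2") "G" "3") "T" "4").toList.map pvIntOfChar)
      = S.toList.map pvMapChar := by
  simp only [PySem.Str.toList_replace]
  rw [show ("A" : String).toList = ['A'] from by decide,
      show ("1" : String).toList = ['1'] from by decide,
      show ("C" : String).toList = ['C'] from by decide,
      show ("2" : String).toList = ['2'] from by decide,
      show ("G" : String).toList = ['G'] from by decide,
      show ("3" : String).toList = ['3'] from by decide,
      show ("T" : String).toList = ['T'] from by decide,
      show ("4" : String).toList = ['4'] from by decide]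
  rw [replace_single, replace_single, replace_single, replace_single]
  simp only [List.map_map]
  exact List.map_congr_left fun c hc => char_map_eq c (hS c hc)

-- running sums: pvScan t l = [t, t+l0, t+l0+l1, …]
def pvScan (t : Int) : List Int → List Int
  | [] => [t]
  | a :: l => t :: pvScan (t + a) l

theorem pvScan_length (l : List Int) : ∀ t, (pvScan t l).length = l.length + 1 := by
  induction l with
  | nil => intro t; simp [pvScan]
  | cons a l ih => intro t; simp [pvScan, ih]

theorem pvScan_getD (l : List Int) : ∀ (t : Int) (k : Nat), k ≤ l.length →
    (pvScan t l).getD k 0 = t + (l.take k).sum := by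
  induction l with
  | nil =>
    intro t k hk
    simp only [List.length_nil, Nat.le_zero] at hk
    subst hk; simp [pvScan]
  | cons a l ih =>
    intro t k hk
    cases k with
    | zero => simp [pvScan]
    | succ k =>
      simp only [pvScan, List.getD_cons_succ, List.take_succ_cons, List.sum_cons]
      rw [ih (t + a) k (by simpa using hk)]
      ring

-- the foldl of pvPrefixSums, generalized over the already-filled front
theorem prefix_fold_spec (l : List Int) :
    ∀ (front : List Int) (t : Int),
      (PySem.List.enumerate l (front.length : Int)).foldl
          (fun prefs na =>
            PySem.List.pySetD prefs (na.1 + 1) (PySem.List.pyGetD prefs na.1 0 + na.2))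
          (front ++ t :: List.replicate l.length 0)
        = front ++ pvScan t l := by
  induction l with
  | nil => intro front t; simp [PySem.List.enumerate_nil, pvScan]
  | cons a l ih =>
    intro front t
    rw [PySem.List.enumerate_cons]
    simp only [List.foldl_cons]
    have hget : PySem.List.pyGetD (front ++ t :: List.replicate (a :: l).length 0)
        ((front.length : Int)) 0 = t := by
      rw [PySem.List.pyGetD_natCast]
      simp [List.getD]
    have hset : PySem.List.pySetD (front ++ t :: List.replicate (a :: l).length 0)
        ((front.length : Int) + 1) (t + a)
        = (front ++ [t]) ++ (t + a) :: List.replicate l.length 0 := by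
      have : ((front.length : Int) + 1) = ((front.length + 1 : Nat) : Int) := by push_cast; ring
      rw [this, PySem.List.pySetD_natCast]
      rw [List.set_append_right _ _ (by omega)]
      simp [List.replicate_succ]
    rw [hget, hset]
    have hlen : ((front.length : Int) + 1) = (((front ++ [t]).length : Nat) : Int) := by
      simp
    rw [hlen, ih (front ++ [t]) (t + a)]
    simp [pvScan]

theorem pvPrefixSums_eq (A : List Int) : pvPrefixSums A = pvScan 0 A := by
  have := prefix_fold_spec A [] 0
  simpa [pvPrefixSums, List.replicate_succ] using this

-- B's inner summation loop as a slice sum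
theorem pvInnerSum (xs : List Int) (p q : Int) (hp : 0 ≤ p) (hpq : p ≤ q)
    (hq : q < (xs.length : Int)) :
    (PySem.List.pyRange p (q + 1) 1).foldl (fun t i => t + PySem.List.pyGetD xs i 0) 0
      = ((xs.drop p.toNat).take (q.toNat + 1 - p.toNat)).sum := by
  rw [PySem.List.foldl_add]
  rw [PySem.List.pyRange_one]
  simp only [List.map_map, Int.zero_add]
  have hm : ((q + 1 - p).toNat) = q.toNat + 1 - p.toNat := by omega
  rw [hm]
  congr 1
  apply List.ext_getElem
  · simp
    omega
  · intro k hk1 hk2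
    simp only [List.getElem_map, List.getElem_range, Function.comp_apply]
    have hkm : k < q.toNat + 1 - p.toNat := by simpa using hk1
    have h0 : (0 : Int) ≤ p + k := by omega
    have hlt : p + k < (xs.length : Int) := by omega
    rw [PySem.List.pyGetD_eq_getElem _ _ h0 (by simpa using hlt)]
    rw [List.getElem_take, List.getElem_drop]
    congr 1
    omega

-- per-query equality: A's prefix difference = B's direct sum (p = q + 1 is the empty query)
theorem pair_eq (xs : List Int) (p q : Int) (hp : 0 ≤ p) (hpq : p ≤ q + 1)
    (hq : q < (xs.length : Int)) :
    pvCountTotal (pvPrefixSums xs) p q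
      = (PySem.List.pyRange p (q + 1) 1).foldl (fun t i => t + PySem.List.pyGetD xs i 0) 0 := by
  rcases eq_or_lt_of_le hpq with heq | hlt
  · rw [heq, PySem.List.pyRange_one_eq_nil le_rfl, pvCountTotal]
    simp
  · have hpq' : p ≤ q := by omega
    rw [pvInnerSum xs p q hp hpq' hq, pvCountTotal, pvPrefixSums_eq]
    have hlen : (pvScan 0 xs).length = xs.length + 1 := pvScan_length xs 0
    have h1 : PySem.List.pyGetD (pvScan 0 xs) (q + 1) 0 = (xs.take (q.toNat + 1)).sum := by
      rw [PySem.List.pyGetD_eq_getElem _ _ (by omega) (by simp [hlen]; omega)]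
      have : (q + 1).toNat = q.toNat + 1 := by omega
      rw [List.getElem_eq_getD, this]
      rw [pvScan_getD xs 0 (q.toNat + 1) (by omega)]
      ring
    have h2 : PySem.List.pyGetD (pvScan 0 xs) p 0 = (xs.take p.toNat).sum := by
      rw [PySem.List.pyGetD_eq_getElem _ _ hp (by simp [hlen]; omega)]
      rw [List.getElem_eq_getD]
      rw [pvScan_getD xs 0 p.toNat (by omega)]
      ring
    rw [h1, h2]
    have hsplit : xs.take (q.toNat + 1) = xs.take p.toNat ++ (xs.drop p.toNat).take (q.toNat + 1 - p.toNat) := by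
      rw [← List.take_add]
      congr 1
      omega
    rw [hsplit, List.sum_append]
    ring

-- ===== VERDICT (by name: the statement is the Claim_ definition above) =====
theorem solution2_spec : Claim_equal_solution2 := by
  intro S P Q _hDom hPre
  unfold Spec_solution2 solution2 solution2_alt
  dsimp only
  obtain ⟨hS, hPQ⟩ := hPre
  rw [List.all_eq_true] at hS hPQ
  rw [integers_eq S (fun c hc => by simpa using hS c hc)]
  rw [PySem.List.foldl_append_singleton_eq_map, PySem.List.foldl_append_singleton_eq_map]
  simp only [List.nil_append]
  apply List.map_congr_left
  intro pq hpq
  have h := hPQ pq hpq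
  simp only [Bool.and_eq_true, decide_eq_true_eq] at h
  exact pair_eq _ pq.1 pq.2 h.1.1 h.1.2 (by simpa using h.2)
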